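-- pv_equiv track=rewrite | github.com/SeaLiteral/hjejleOrdbog | optional/make-table.py | makeDanish
-- ===== SOURCE A (Python) =====
-- def makeDanish(stroke):
--     '''Translates a stroke from the English layout into the Danish one.'''
--     position=0
--     result=''
--     for key in 'S T K P W:V H R A O * E:Æ U:Å - F:V R P B:E L G:K T D S Z:N'.split():
--         eng=''
--         dan=''
--         if(':' in key):
--             parts=key.split(':')
--             eng=parts[0]
--             dan=parts[1]
--         else:
--             eng=key
--             dan=key
--         if(position>=(len(stroke))):
--            return(result)
--         if(stroke[position]==eng):
--             result+=dan
--             position+=1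
--     return(result)
-- ===== SOURCE B (Python) =====
-- def makeDanish(stroke):
--     '''Translates a stroke from the English layout into the Danish one.'''
--     pairs = []
--     for key in 'S T K P W:V H R A O * E:Æ U:Å - F:V R P B:E L G:K T D S Z:N'.split():
--         parts = key.split(':')
--         pairs.append((parts[0], parts[-1]))
--     out = ''
--     pi = 0
--     n = len(pairs)
--     for ch in stroke:
--         while pi < n and pairs[pi][0] != ch:
--             pi += 1
--         if pi == n:
--             break
--         out += pairs[pi][1]
--         pi += 1
--     return out
-- ===== Notes on version B (the rewrite author's own statement) =====
-- stated objective: alternative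
-- what changed: B parses the layout string once into (eng,dan) pairs, then inverts the loop: the outer loop runs over the stroke's characters with an inner forward scan of the pair list, instead of A's single loop over layout keys that parses each key inline and early-returns when the stroke is exhausted.
import Mathlib
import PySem

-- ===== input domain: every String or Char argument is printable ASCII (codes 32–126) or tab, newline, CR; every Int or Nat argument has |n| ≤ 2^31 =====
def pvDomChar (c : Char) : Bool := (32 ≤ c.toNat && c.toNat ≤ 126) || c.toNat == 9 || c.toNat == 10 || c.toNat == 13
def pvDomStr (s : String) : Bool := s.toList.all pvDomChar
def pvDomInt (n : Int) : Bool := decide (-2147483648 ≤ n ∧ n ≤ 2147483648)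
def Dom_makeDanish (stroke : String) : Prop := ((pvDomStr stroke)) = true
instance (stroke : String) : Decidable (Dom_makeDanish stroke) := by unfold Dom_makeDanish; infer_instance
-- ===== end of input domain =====

-- B re-parses the layout once into pairs and drives the loop by the stroke instead of by the
-- layout keys (alternative decomposition, same cost); return values agree everywhere.

-- ===== PORT A =====
-- the key list 'S T K P …'.split() of A, via PySem
def pvKeysA : List String :=
  PySem.Str.split₀ "S T K P W:V H R A O * E:Æ U:Å - F:V R P B:E L G:K T D S Z:N"

-- the inline eng/dan computation of A's loop body (parts[0]/parts[1]; getD is only a totality guard)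
def parseKeyA (key : String) : String × String :=
  if key.toList.contains ':' then
    let parts := (PySem.Str.split? key ":").getD []
    (List.getD parts 0 "", List.getD parts 1 "")
  else (key, key)

-- A's loop over the keys; 'rest' is the unread suffix of the stroke (position ↔ dropped prefix),
-- the 'position >= len(stroke)' early return is the 'rest = []' case
def goA : List String → List Char → String → String
  | [], _, result => result
  | key :: ks, rest, result =>
    let p := parseKeyA key
    match rest with
    | [] => result
    | c :: cs => if c.toString = p.1 then goA ks cs (result ++ p.2) else goA ks (c :: cs) result

def makeDanish (stroke : String) : String := goA pvKeysA stroke.toList ""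

-- ===== PORT B =====
-- B's pair list, parsed once: (parts[0], parts[-1]) of key.split(':')
def pvPairsB : List (String × String) :=
  (PySem.Str.split₀ "S T K P W:V H R A O * E:Æ U:Å - F:V R P B:E L G:K T D S Z:N").map
    (fun key =>
      let parts := (PySem.Str.split? key ":").getD []
      (List.getD parts 0 "", List.getD parts (parts.length - 1) ""))

-- B's inner while loop: advance through the pair list until pairs[pi][0] == ch;
-- returns the matched dan and the remaining suffix, none when pi runs off the end
def scanB : Char → List (String × String) → Option (String × List (String × String))
  | _, [] => none
  | c, p :: ps => if p.1 ≠ c.toString then scanB c ps else some (p.2, ps)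

-- B's outer loop over the stroke's characters ('break' = the none case)
def goB : List Char → List (String × String) → String → String
  | [], _, out => out
  | c :: cs, ps, out =>
    match scanB c ps with
    | none => out
    | some (d, ps') => goB cs ps' (out ++ d)

def makeDanish_alt (stroke : String) : String := goB stroke.toList pvPairsB ""

-- ===== PRECONDITION & SPEC =====
def Spec_makeDanish (stroke : String) (out : String) : Prop := out = makeDanish_alt stroke
instance (stroke : String) (out : String) : Decidable (Spec_makeDanish stroke out) := by unfold Spec_makeDanish; infer_instance

-- ===== CLAIM (what is proved, stated in full; the proofs are below) =====
def Claim_equal_makeDanish : Prop := ∀ (stroke : String), Dom_makeDanish stroke → Spec_makeDanish stroke (makeDanish stroke)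

-- ===== LEMMAS AND PROOFS =====

-- A's key-driven loop equals B's stroke-driven loop over the parsed pairs
lemma goA_eq_goB : ∀ (ks : List String) (rest : List Char) (res : String),
    goA ks rest res = goB rest (ks.map parseKeyA) res := by
  intro ks
  induction ks with
  | nil => intro rest res; cases rest <;> rfl
  | cons key ks ih =>
    intro rest res
    cases rest with
    | nil => rfl
    | cons c cs =>
      by_cases h : (parseKeyA key).1 = String.singleton c
      · simp [goA, goB, scanB, h, ih]
      · simp [goA, goB, scanB, h, Ne.symm h, ih]

-- B's once-parsed pair list is the map of A's inline parse over A's key list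
lemma pairs_eq : pvKeysA.map parseKeyA = pvPairsB := by rfl

theorem makeDanish_spec : Claim_equal_makeDanish := by
  intro stroke _
  unfold Spec_makeDanish makeDanish makeDanish_alt
  rw [goA_eq_goB, pairs_eq]
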